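-- pv_equiv track=rewrite | github.com/vinzenz/gmake2cmake | gmake2cmake/parallel.py | _collect_component
-- ===== SOURCE A (Python) =====
-- from typing import Dict, List, Optional, Set, Tuple
--
-- def _collect_component(root: str, reverse_deps: Dict[str, Set[str]], processed: Set[str]) -> Set[str]:
--     component: Set[str] = set()
--
--     def get_all_dependents(node: str) -> None:
--         if node in processed:
--             return
--         processed.add(node)
--         component.add(node)
--         for dependent in reverse_deps.get(node, set()):
--             if dependent not in component:
--                 get_all_dependents(dependent)
--
--     get_all_dependents(root)
--     return component
-- ===== SOURCE B (Python) =====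
-- def _collect_component(root, reverse_deps, processed):
--     component = set()
--     stack = [root]
--     while stack:
--         node = stack.pop(0)
--         if node not in processed:
--             processed.add(node)
--             component.add(node)
--             stack[:0] = reverse_deps.get(node, ())
--     return component
-- ===== Notes on version B (the rewrite author's own statement) =====
-- stated objective: alternative
-- what changed: Replaces the recursive DFS (nested helper function recursing through the reverse-dependency sets) by an iterative DFS driven by an explicit worklist: take the front node, skip it if already processed, otherwise mark it and prepend its dependents; same visited set, same cost.
import Mathlib
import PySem

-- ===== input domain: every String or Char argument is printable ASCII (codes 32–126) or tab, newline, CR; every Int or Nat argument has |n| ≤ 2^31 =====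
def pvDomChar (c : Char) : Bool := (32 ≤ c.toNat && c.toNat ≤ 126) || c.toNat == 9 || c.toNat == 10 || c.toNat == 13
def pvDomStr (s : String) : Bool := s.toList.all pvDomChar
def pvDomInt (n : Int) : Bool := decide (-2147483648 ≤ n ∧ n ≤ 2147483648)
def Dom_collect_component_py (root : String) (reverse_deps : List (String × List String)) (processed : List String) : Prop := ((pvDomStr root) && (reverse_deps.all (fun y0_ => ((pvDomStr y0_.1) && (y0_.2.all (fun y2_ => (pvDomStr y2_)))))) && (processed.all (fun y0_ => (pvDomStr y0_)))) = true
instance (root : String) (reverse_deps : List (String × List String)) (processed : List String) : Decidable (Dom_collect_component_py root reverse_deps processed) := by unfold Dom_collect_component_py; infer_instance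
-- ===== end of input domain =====

-- B replaces A's recursive DFS by an iterative DFS driven by an explicit worklist
-- (alternative decomposition, same cost). Both Pythons also add the visited nodes to the
-- caller's `processed` set in place (identically); the equivalence proved here is about
-- the RETURN value (the component, modelled as its list of elements in insertion order).

-- ===== PORT A =====
-- `processed.add(node); component.add(node)` on the state (processed, component)
def pvMark (node : String) (s : List String × List String) : List String × List String :=
  (PySem.Set.add s.1 node, PySem.Set.add s.2 node)

-- fuel: 2 + Σ over dict entries (1 + |value|); proved sufficient below, so the
-- fuel guard is only a totality device, never reached
def pvFuel (reverse_deps : List (String × List String)) : Nat :=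
  2 + (reverse_deps.map (fun kv => 1 + kv.2.length)).sum

-- `get_all_dependents`: the inner for-loop is the foldl; `reverse_deps.get(node, set())`
-- is Dict.getD (the dict's stored value set, iterated in its stored order — the resulting
-- component SET does not depend on that order, and sets are compared as sets)
def pvVisitA (rd : List (String × List String)) : Nat → String → List String × List String → List String × List String
  | 0, _, s => s
  | n+1, node, s =>
    if s.1.contains node then s
    else ((PySem.Dict.mk rd).getD node []).foldl
      (fun t c => if t.2.contains c then t else pvVisitA rd n c t) (pvMark node s)

def collect_component_py (root : String) (reverse_deps : List (String × List String)) (processed : List String) : List String :=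
  (pvVisitA reverse_deps (pvFuel reverse_deps) root (processed, [])).2

-- ===== PORT B =====
-- termination measure for Source B's while-loop: total weight of the dict entries whose
-- key has not yet been processed
def pvWeight (rd : List (String × List String)) (seen : List String) : Nat :=
  ((rd.filter (fun kv => !(seen.contains kv.1))).map (fun kv => kv.2.length + 1)).sum

-- the loop's decreasing argument, cited by name in `decreasing_by` below
theorem pvStackDec (rd : List (String × List String)) (pr : List String) (node : String)
    (rest : List String) (h : ¬ pr.contains node = true) :
    (((PySem.Dict.mk rd).getD node []) ++ rest).length + pvWeight rd (PySem.Set.add pr node)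
      < (node :: rest).length + pvWeight rd pr := by
  have hn : node ∉ pr := fun hm => h (List.contains_iff_mem.2 hm)
  have hcons : ∀ (kv : String × List String) (r : List (String × List String)) (seen : List String),
      pvWeight (kv :: r) seen = (if kv.1 ∈ seen then 0 else kv.2.length + 1) + pvWeight r seen := by
    intro kv r seen
    by_cases hc : kv.1 ∈ seen
    · simp [pvWeight, hc]
    · simp [pvWeight, hc]
  have hanti : ∀ (rd' : List (String × List String)),
      pvWeight rd' (PySem.Set.add pr node) ≤ pvWeight rd' pr := by
    intro rd'
    induction rd' with
    | nil => simp [pvWeight]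
    | cons kv r ih =>
      rw [hcons, hcons]
      have h1 : (if kv.1 ∈ PySem.Set.add pr node then 0 else kv.2.length + 1) ≤
          (if kv.1 ∈ pr then 0 else kv.2.length + 1) := by
        by_cases hc : kv.1 ∈ pr
        · simp [hc, (PySem.Set.mem_add pr node kv.1).2 (Or.inl hc)]
        · rw [if_neg hc]; split <;> omega
      omega
  have hkey : ∀ (rd' : List (String × List String)) (l : List String),
      (PySem.Dict.mk rd').get? node = some l →
      l.length + 1 + pvWeight rd' (PySem.Set.add pr node) ≤ pvWeight rd' pr := by
    intro rd'
    induction rd' with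
    | nil => intro l hg; simp [PySem.Dict.get?] at hg
    | cons kv r ih =>
      intro l hg
      rw [PySem.Dict.get?_mk_cons] at hg
      by_cases hk : (kv.1 == node) = true
      · rw [if_pos hk] at hg
        have hkeq : kv.1 = node := by simpa using hk
        have hl : kv.2 = l := by simpa using hg
        have hpr : kv.1 ∉ pr := fun hc => hn (hkeq ▸ hc)
        have hpr' : kv.1 ∈ PySem.Set.add pr node :=
          (PySem.Set.mem_add pr node kv.1).2 (Or.inr hkeq)
        have hlen : kv.2.length = l.length := by rw [hl]
        have hr := hanti r
        rw [hcons, hcons, if_neg hpr, if_pos hpr']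
        omega
      · rw [if_neg hk] at hg
        have := ih l hg
        by_cases hc : kv.1 ∈ pr
        · rw [hcons, hcons, if_pos hc, if_pos ((PySem.Set.mem_add pr node kv.1).2 (Or.inl hc))]
          omega
        · have hc' : kv.1 ∉ PySem.Set.add pr node := by
            intro hm
            rcases (PySem.Set.mem_add pr node kv.1).1 hm with h1 | h1
            · exact hc h1
            · exact hk (by simpa using h1)
          rw [hcons, hcons, if_neg hc, if_neg hc']
          omega
  cases hg : (PySem.Dict.mk rd).get? node with
  | none =>
    have hgd : (PySem.Dict.mk rd).getD node [] = [] := by simp [PySem.Dict.getD, hg]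
    rw [hgd]
    have := hanti rd
    simp only [List.nil_append, List.length_cons]
    omega
  | some l =>
    have hgd : (PySem.Dict.mk rd).getD node [] = l := by simp [PySem.Dict.getD, hg]
    rw [hgd]
    have := hkey rd l hg
    simp only [List.length_append, List.length_cons]
    omega

-- Source B's loop: pop the FRONT node of the worklist; skip it if processed, else mark it
-- (into processed and component) and PREPEND its dependents (`stack[:0] = deps`)
def pvLoopB (rd : List (String × List String)) (stack : List String)
    (processed component : List String) : List String × List String :=
  match stack with
  | [] => (processed, component)
  | node :: rest =>
    if h : processed.contains node then pvLoopB rd rest processed component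
    else pvLoopB rd (((PySem.Dict.mk rd).getD node []) ++ rest)
          (PySem.Set.add processed node) (PySem.Set.add component node)
termination_by stack.length + pvWeight rd processed
decreasing_by
  · simp only [List.length_cons]; omega
  · exact pvStackDec rd processed node rest h

def collect_component_py_alt (root : String) (reverse_deps : List (String × List String)) (processed : List String) : List String :=
  (pvLoopB reverse_deps [root] processed []).2

-- ===== PRECONDITION & SPEC =====
def Spec_collect_component_py (root : String) (reverse_deps : List (String × List String)) (processed : List String) (out : List String) : Prop := out = collect_component_py_alt root reverse_deps processed
instance (root : String) (reverse_deps : List (String × List String)) (processed : List String) (out : List String) : Decidable (Spec_collect_component_py root reverse_deps processed out) := by unfold Spec_collect_component_py; infer_instance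

-- ===== CLAIM (what is proved, stated in full; the proofs are below) =====
def Claim_equal_collect_component_py : Prop := ∀ (root : String) (reverse_deps : List (String × List String)) (processed : List String), Dom_collect_component_py root reverse_deps processed → Spec_collect_component_py root reverse_deps processed (collect_component_py root reverse_deps processed)

-- ===== LEMMAS AND PROOFS =====

-- the body of A's inner for-loop
def pvStep (rd : List (String × List String)) (n : Nat) (t : List String × List String) (c : String) : List String × List String :=
  if t.2.contains c then t else pvVisitA rd n c t

theorem pvVisitA_succ (rd : List (String × List String)) (n : Nat) (node : String) (s : List String × List String) :
    pvVisitA rd (n+1) node s =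
      if s.1.contains node then s
      else ((PySem.Dict.mk rd).getD node []).foldl (pvStep rd n) (pvMark node s) := rfl

theorem pvWeight_cons (kv : String × List String) (rest : List (String × List String)) (seen : List String) :
    pvWeight (kv :: rest) seen = (if kv.1 ∈ seen then 0 else kv.2.length + 1) + pvWeight rest seen := by
  by_cases hc : kv.1 ∈ seen
  · simp [pvWeight, hc]
  · simp [pvWeight, hc]

-- the invariant `component ⊆ processed`
def pvInv (s : List String × List String) : Prop := ∀ x, x ∈ s.2 → x ∈ s.1

theorem pvWeight_anti (rd : List (String × List String)) (pr pr' : List String)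
    (h : ∀ x, x ∈ pr → x ∈ pr') : pvWeight rd pr' ≤ pvWeight rd pr := by
  induction rd with
  | nil => simp [pvWeight]
  | cons kv rest ih =>
    rw [pvWeight_cons, pvWeight_cons]
    have h1 : (if kv.1 ∈ pr' then 0 else kv.2.length + 1) ≤
        (if kv.1 ∈ pr then 0 else kv.2.length + 1) := by
      by_cases hc : kv.1 ∈ pr
      · simp [hc, h _ hc]
      · rw [if_neg hc]; split <;> omega
    omega

theorem pvWeight_le_fuel (rd : List (String × List String)) (pr : List String) :
    pvWeight rd pr ≤ (rd.map (fun kv => 1 + kv.2.length)).sum := by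
  induction rd with
  | nil => simp [pvWeight]
  | cons kv rest ih =>
    rw [pvWeight_cons]
    simp only [List.map_cons, List.sum_cons]
    have h1 : (if kv.1 ∈ pr then 0 else kv.2.length + 1) ≤ 1 + kv.2.length := by
      split <;> omega
    omega

theorem pvWeight_add_le (rd : List (String × List String)) (pr : List String) (c : String) :
    pvWeight rd (PySem.Set.add pr c) ≤ pvWeight rd pr :=
  pvWeight_anti rd pr _ (fun x hx => (PySem.Set.mem_add pr c x).2 (Or.inl hx))

theorem pvWeight_key (rd : List (String × List String)) (pr : List String) (node : String) (l : List String)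
    (hg : (PySem.Dict.mk rd).get? node = some l) (hn : ¬ node ∈ pr) :
    l.length + 1 + pvWeight rd (PySem.Set.add pr node) ≤ pvWeight rd pr := by
  induction rd with
  | nil => simp [PySem.Dict.get?] at hg
  | cons kv rest ih =>
    rw [PySem.Dict.get?_mk_cons] at hg
    by_cases hk : (kv.1 == node) = true
    · rw [if_pos hk] at hg
      have hkeq : kv.1 = node := by simpa using hk
      have hl : kv.2 = l := by simpa using hg
      have hpr : kv.1 ∉ pr := fun hc => hn (hkeq ▸ hc)
      have hpr' : kv.1 ∈ PySem.Set.add pr node :=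
        (PySem.Set.mem_add pr node kv.1).2 (Or.inr hkeq)
      have hlen : kv.2.length = l.length := by rw [hl]
      have hr : pvWeight rest (PySem.Set.add pr node) ≤ pvWeight rest pr :=
        pvWeight_add_le rest pr node
      rw [pvWeight_cons, pvWeight_cons, if_neg hpr, if_pos hpr']
      omega
    · rw [if_neg hk] at hg
      have := ih hg
      by_cases hc : kv.1 ∈ pr
      · rw [pvWeight_cons, pvWeight_cons, if_pos hc, if_pos ((PySem.Set.mem_add pr node kv.1).2 (Or.inl hc))]
        omega
      · have hc' : kv.1 ∉ PySem.Set.add pr node := by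
          intro hm
          rcases (PySem.Set.mem_add pr node kv.1).1 hm with h1 | h1
          · exact hc h1
          · exact hk (by simpa using h1)
        rw [pvWeight_cons, pvWeight_cons, if_neg hc, if_neg hc']
        omega

theorem pvGetD_none (rd : List (String × List String)) (node : String)
    (hg : (PySem.Dict.mk rd).get? node = none) : (PySem.Dict.mk rd).getD node [] = [] := by
  simp [PySem.Dict.getD, hg]

theorem pvGetD_some (rd : List (String × List String)) (node : String) (l : List String)
    (hg : (PySem.Dict.mk rd).get? node = some l) : (PySem.Dict.mk rd).getD node [] = l := by
  simp [PySem.Dict.getD, hg]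

-- processed only grows along A's recursion
theorem pvA_mono (rd : List (String × List String)) (n : Nat) :
    (∀ (node : String) (s : List String × List String) (x : String), x ∈ s.1 → x ∈ (pvVisitA rd n node s).1) ∧
    (∀ (cs : List String) (s : List String × List String) (x : String), x ∈ s.1 → x ∈ (cs.foldl (pvStep rd n) s).1) := by
  induction n with
  | zero =>
    have hv : ∀ (node : String) (s : List String × List String) (x : String),
        x ∈ s.1 → x ∈ (pvVisitA rd 0 node s).1 := by
      intro node s x hx; simpa [pvVisitA] using hx
    refine ⟨hv, ?_⟩
    intro cs
    induction cs with
    | nil => intro s x hx; simpa using hx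
    | cons c cs ihc =>
      intro s x hx
      rw [List.foldl_cons]
      apply ihc
      simp only [pvStep]
      split
      · exact hx
      · exact hv c s x hx
  | succ n ih =>
    have hv : ∀ (node : String) (s : List String × List String) (x : String),
        x ∈ s.1 → x ∈ (pvVisitA rd (n+1) node s).1 := by
      intro node s x hx
      rw [pvVisitA_succ]
      split
      · exact hx
      · exact ih.2 _ _ _ ((PySem.Set.mem_add s.1 node x).2 (Or.inl hx))
    refine ⟨hv, ?_⟩
    intro cs
    induction cs with
    | nil => intro s x hx; simpa using hx
    | cons c cs ihc =>
      intro s x hx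
      rw [List.foldl_cons]
      apply ihc
      simp only [pvStep]
      split
      · exact hx
      · exact hv c s x hx

-- the invariant is preserved by A
theorem pvA_inv (rd : List (String × List String)) (n : Nat) :
    (∀ (node : String) (s : List String × List String), pvInv s → pvInv (pvVisitA rd n node s)) ∧
    (∀ (cs : List String) (s : List String × List String), pvInv s → pvInv (cs.foldl (pvStep rd n) s)) := by
  have hmark : ∀ (node : String) (s : List String × List String), pvInv s → pvInv (pvMark node s) := by
    intro node s hs x hx
    rcases (PySem.Set.mem_add s.2 node x).1 hx with h1 | h1
    · exact (PySem.Set.mem_add s.1 node x).2 (Or.inl (hs x h1))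
    · exact (PySem.Set.mem_add s.1 node x).2 (Or.inr h1)
  induction n with
  | zero =>
    have hv : ∀ (node : String) (s : List String × List String), pvInv s → pvInv (pvVisitA rd 0 node s) := by
      intro node s hs; simpa [pvVisitA] using hs
    refine ⟨hv, ?_⟩
    intro cs
    induction cs with
    | nil => intro s hs; simpa using hs
    | cons c cs ihc =>
      intro s hs
      rw [List.foldl_cons]
      apply ihc
      simp only [pvStep]
      split
      · exact hs
      · exact hv c s hs
  | succ n ih =>
    have hv : ∀ (node : String) (s : List String × List String), pvInv s → pvInv (pvVisitA rd (n+1) node s) := by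
      intro node s hs
      rw [pvVisitA_succ]
      split
      · exact hs
      · exact ih.2 _ _ (hmark node s hs)
    refine ⟨hv, ?_⟩
    intro cs
    induction cs with
    | nil => intro s hs; simpa using hs
    | cons c cs ihc =>
      intro s hs
      rw [List.foldl_cons]
      apply ihc
      simp only [pvStep]
      split
      · exact hs
      · exact hv c s hs

theorem pvLoopB_nil (rd : List (String × List String)) (p c : List String) :
    pvLoopB rd [] p c = (p, c) := by
  rw [pvLoopB]

theorem pvLoopB_cons (rd : List (String × List String)) (x : String) (st : List String) (p c : List String) :
    pvLoopB rd (x :: st) p c =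
      if p.contains x then pvLoopB rd st p c
      else pvLoopB rd (((PySem.Dict.mk rd).getD x []) ++ st) (PySem.Set.add p x) (PySem.Set.add c x) := by
  rw [pvLoopB]
  split <;> simp_all

theorem pvLoopB_append (rd : List (String × List String)) (xs ys : List String) (p c : List String) :
    pvLoopB rd (xs ++ ys) p c = pvLoopB rd ys (pvLoopB rd xs p c).1 (pvLoopB rd xs p c).2 := by
  generalize hM : xs.length + pvWeight rd p = M
  induction M using Nat.strong_induction_on generalizing xs p c with
  | _ M ih =>
    cases xs with
    | nil => rw [List.nil_append, pvLoopB_nil]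
    | cons x xs =>
      rw [List.cons_append, pvLoopB_cons, pvLoopB_cons rd x xs p c]
      split
      · rename_i hx
        exact ih (xs.length + pvWeight rd p) (by simp only [List.length_cons] at hM; omega) xs p c rfl
      · rename_i hx
        have hxm : x ∉ p := fun hm => hx (List.contains_iff_mem.2 hm)
        rw [← List.append_assoc]
        apply ih ((((PySem.Dict.mk rd).getD x []) ++ xs).length + pvWeight rd (PySem.Set.add p x)) _ _ _ _ rfl
        simp only [List.length_cons] at hM
        cases hg : (PySem.Dict.mk rd).get? x with
        | none =>
          rw [pvGetD_none rd x hg]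
          have hW : pvWeight rd (PySem.Set.add p x) ≤ pvWeight rd p := pvWeight_add_le rd p x
          simp only [List.nil_append]
          omega
        | some l =>
          rw [pvGetD_some rd x l hg]
          have hW := pvWeight_key rd p x l hg hxm
          simp only [List.length_append]
          omega

-- the main correspondence: A's recursion = B's worklist loop
theorem pvMain (rd : List (String × List String)) (n : Nat) :
    (∀ (node : String) (s : List String × List String), pvInv s → pvWeight rd s.1 + 1 ≤ n →
        pvVisitA rd n node s = pvLoopB rd [node] s.1 s.2) ∧
    (∀ (cs : List String) (s : List String × List String), pvInv s → pvWeight rd s.1 + 1 ≤ n →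
        cs.foldl (pvStep rd n) s = pvLoopB rd cs s.1 s.2) := by
  induction n using Nat.strong_induction_on with
  | _ n ih =>
    have hv : ∀ (node : String) (s : List String × List String), pvInv s → pvWeight rd s.1 + 1 ≤ n →
        pvVisitA rd n node s = pvLoopB rd [node] s.1 s.2 := by
      intro node s hInv hn
      match n, hn with
      | n'+1, hn =>
        rw [pvVisitA_succ, pvLoopB_cons]
        split
        · rw [pvLoopB_nil]
        · rename_i hx
          have hxm : node ∉ s.1 := fun hm => hx (List.contains_iff_mem.2 hm)
          rw [List.append_nil]
          cases hg : (PySem.Dict.mk rd).get? node with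
          | none =>
            rw [pvGetD_none rd node hg, List.foldl_nil, pvLoopB_nil]
            rfl
          | some l =>
            rw [pvGetD_some rd node l hg]
            have hmark : pvInv (pvMark node s) := by
              intro x hx
              rcases (PySem.Set.mem_add s.2 node x).1 hx with h1 | h1
              · exact (PySem.Set.mem_add s.1 node x).2 (Or.inl (hInv x h1))
              · exact (PySem.Set.mem_add s.1 node x).2 (Or.inr h1)
            have hW := pvWeight_key rd s.1 node l hg hxm
            exact (ih n' (by omega)).2 l (pvMark node s) hmark
              (by show pvWeight rd (PySem.Set.add s.1 node) + 1 ≤ n'; omega)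
    refine ⟨hv, ?_⟩
    intro cs
    induction cs with
    | nil =>
      intro s hInv hn
      rw [List.foldl_nil, pvLoopB_nil]
    | cons c cs ihc =>
      intro s hInv hn
      rw [List.foldl_cons, pvLoopB_cons]
      by_cases hc2 : s.2.contains c = true
      · have hc1 : s.1.contains c = true :=
          List.contains_iff_mem.2 (hInv c (List.contains_iff_mem.1 hc2))
        rw [if_pos hc1]
        simp only [pvStep, hc2, if_true]
        exact ihc s hInv hn
      · simp only [pvStep, hc2, Bool.false_eq_true, if_false]
        by_cases hc1 : s.1.contains c = true
        · rw [if_pos hc1]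
          have hvs : pvVisitA rd n c s = s := by
            match n, hn with
            | n'+1, _ => rw [pvVisitA_succ, if_pos hc1]
          rw [hvs]
          exact ihc s hInv hn
        · rw [if_neg hc1]
          have hs2 : pvVisitA rd n c s =
              pvLoopB rd ((PySem.Dict.mk rd).getD c [] ++ []) (PySem.Set.add s.1 c) (PySem.Set.add s.2 c) := by
            rw [hv c s hInv hn, pvLoopB_cons, if_neg hc1]
          rw [List.append_nil] at hs2
          rw [pvLoopB_append, ← hs2]
          apply ihc
          · exact (pvA_inv rd n).1 c s hInv
          · have hmono : pvWeight rd (pvVisitA rd n c s).1 ≤ pvWeight rd s.1 :=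
              pvWeight_anti rd s.1 _ (fun x hx => (pvA_mono rd n).1 c s x hx)
            omega

-- ===== VERDICT (by name: the statement is the Claim_ definition above) =====
theorem collect_component_py_spec : Claim_equal_collect_component_py := by
  intro root rd pr _
  show collect_component_py root rd pr = collect_component_py_alt root rd pr
  have hW : pvWeight rd pr + 1 ≤ pvFuel rd := by
    have := pvWeight_le_fuel rd pr
    simp only [pvFuel]; omega
  have hmain := (pvMain rd (pvFuel rd)).1 root (pr, []) (by intro x hx; simp at hx) hW
  simp only [collect_component_py, collect_component_py_alt, hmain]
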